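-- pv_equiv track=rewrite | github.com/khazarkhorrami/visual-familiarity | data_preparation/utilsMSCOCO.py | get_supercats_ids
-- ===== SOURCE A (Python) =====
-- def get_supercats_ids (cats):
--     supercats_ids = {}
--     for key, item in cats.items():
--         item_id = item['id']
--         item_super = item['supercategory']
--         if item_super not in supercats_ids:
--             supercats_ids [item_super] = []
--             supercats_ids[item_super].append(item_id)
--         else:
--             supercats_ids[item_super].append(item_id)
--     return supercats_ids
-- ===== SOURCE B (Python) =====
-- def get_supercats_ids(cats):
--     pairs = [(item['supercategory'], item['id']) for item in cats.values()]
--     order = list(dict.fromkeys(s for s, _ in pairs))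
--     return {s: [i for t, i in pairs if t == s] for s in order}
-- ===== Notes on version B (the rewrite author's own statement) =====
-- stated objective: alternative
-- what changed: A threads a mutable dict through one loop, appending each id under its supercategory; B instead builds the (supercategory, id) pair list once, dedups the supercategories in first-occurrence order, and maps each supercategory to a filter over the pair list, with no dict accumulator.
import Mathlib
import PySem

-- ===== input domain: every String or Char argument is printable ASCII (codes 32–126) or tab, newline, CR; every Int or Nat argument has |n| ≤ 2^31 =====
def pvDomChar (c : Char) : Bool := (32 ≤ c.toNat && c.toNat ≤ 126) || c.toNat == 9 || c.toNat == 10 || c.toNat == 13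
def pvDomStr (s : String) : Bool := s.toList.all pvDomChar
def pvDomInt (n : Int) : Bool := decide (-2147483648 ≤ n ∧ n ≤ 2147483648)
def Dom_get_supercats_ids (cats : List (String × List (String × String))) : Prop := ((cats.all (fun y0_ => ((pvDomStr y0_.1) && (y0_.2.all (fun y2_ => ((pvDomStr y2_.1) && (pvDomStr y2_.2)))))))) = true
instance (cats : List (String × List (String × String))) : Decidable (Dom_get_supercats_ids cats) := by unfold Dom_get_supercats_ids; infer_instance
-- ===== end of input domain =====

-- B replaces A's dict-accumulating loop by a pair-list decomposition: build (supercategory, id)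
-- pairs once, dedup the supercategories in first-occurrence order, and map each to a filter over
-- the pairs (objective: alternative decomposition, same cost class).


-- ===== PORT A =====
-- item['id'] / item['supercategory'] raise KeyError when absent; Pre_ excludes those inputs,
-- so the '.getD ""' fallback is never reached inside Pre_.
def get_supercats_ids (cats : List (String × List (String × String))) : List (String × List String) :=
  ((PySem.Dict.ofList cats).items.foldl (fun (d : PySem.Dict String (List String)) kv =>
      let item := PySem.Dict.ofList kv.2
      let item_id := (item.get? "id").getD ""
      let item_super := (item.get? "supercategory").getD ""
      if d.contains item_super = false then
        (d.insert item_super []).modify item_super [] (fun l => l ++ [item_id])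
      else
        d.modify item_super [] (fun l => l ++ [item_id]))
    PySem.Dict.empty).items

-- ===== PORT B =====
def get_supercats_ids_alt (cats : List (String × List (String × String))) : List (String × List String) :=
  let pairs := (PySem.Dict.ofList cats).values.map (fun item =>
      let it := PySem.Dict.ofList item
      (((it.get? "supercategory").getD ""), ((it.get? "id").getD "")))
  let order := PySem.List.dedup (pairs.map (fun p => p.1))
  order.map (fun s => (s, (pairs.filter (fun p => p.1 == s)).map (fun p => p.2)))

-- ===== PRECONDITION & SPEC =====
-- Pre_ excludes exactly the inputs where some item dict lacks an 'id' or 'supercategory' key: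
-- there the Python A raises KeyError (and B raises KeyError too).
def Pre_get_supercats_ids (cats : List (String × List (String × String))) : Prop :=
  ∀ kv ∈ cats, ("id" ∈ kv.2.map Prod.fst ∧ "supercategory" ∈ kv.2.map Prod.fst)
instance (cats : List (String × List (String × String))) : Decidable (Pre_get_supercats_ids cats) := by unfold Pre_get_supercats_ids; infer_instance
def pvWitness_get_supercats_ids : (List (String × List (String × String))) :=
  [("cat", [("id", "1"), ("supercategory", "animal")]), ("dog", [("id", "2"), ("supercategory", "animal")])]
def Spec_get_supercats_ids (cats : List (String × List (String × String))) (out : List (String × List String)) : Prop := out = get_supercats_ids_alt cats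
instance (cats : List (String × List (String × String))) (out : List (String × List String)) : Decidable (Spec_get_supercats_ids cats out) := by unfold Spec_get_supercats_ids; infer_instance

-- ===== CLAIM (what is proved, stated in full; the proofs are below) =====
def Claim_equal_get_supercats_ids : Prop := ∀ (cats : List (String × List (String × String))), Dom_get_supercats_ids cats → Pre_get_supercats_ids cats → Spec_get_supercats_ids cats (get_supercats_ids cats)

-- ===== LEMMAS AND PROOFS =====

-- A's two branches both amount to d[super] = d.get(super, []) + [id]
theorem step_collapse (d : PySem.Dict String (List String)) (k v : String) :
    (if d.contains k = false then
        (d.insert k []).modify k [] (fun l => l ++ [v])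
      else
        d.modify k [] (fun l => l ++ [v])) = d.modify k [] (fun l => l ++ [v]) := by
  by_cases h : d.contains k = false
  · rw [if_pos h]
    have hany : (d.items.any fun p => p.1 == k) = false := by
      simpa [PySem.Dict.contains] using h
    have hfind : d.items.find? (fun p => p.1 == k) = none := by
      rw [List.find?_eq_none]
      intro p hp
      have := List.any_eq_false.1 hany p hp
      simpa using this
    have hmem : ∀ p ∈ d.items, ¬ (p.1 = k) := by
      intro p hp
      have := List.any_eq_false.1 hany p hp
      simpa using this
    simp only [PySem.Dict.modify, PySem.Dict.insert, PySem.Dict.getD, PySem.Dict.get?,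
      PySem.Dict.contains, hany, if_false, Bool.false_eq_true, List.any_append, List.find?_append,
      hfind, List.any_cons, List.any_nil, beq_self_eq_true, Bool.or_false, Bool.false_or, if_true,
      List.find?_cons, List.map_append, List.map_cons, List.map_nil,
      Option.map_none, Option.getD_none]
    simp only [Option.none_or, Option.map_some, Option.getD_some, List.nil_append]
    congr 1
    conv_lhs => rw [List.map_congr_left (g := id) (fun p hp => by simp [hmem p hp])]
    simp
  · rw [if_neg h]

-- a Nodup-keyed dict is its key list paired with the stored values
theorem items_eq_keys_map (d : PySem.Dict String (List String)) (h : d.keys.Nodup) :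
    d.items = d.keys.map (fun k => (k, d.getD k [])) := by
  have hmap : d.items.map (fun p => (p.1, d.getD p.1 [])) = d.items.map id := by
    apply List.map_congr_left
    intro p hp
    have := PySem.Dict.getD_of_mem_items (d := d) (k := p.1) (v := p.2) (by simpa using hp) h (d0 := [])
    simp [this]
  calc d.items = d.items.map id := by simp
    _ = d.items.map (fun p => (p.1, d.getD p.1 [])) := hmap.symm
    _ = (d.items.map (fun p => p.1)).map (fun k => (k, d.getD k [])) := by rw [List.map_map]; rfl
    _ = d.keys.map (fun k => (k, d.getD k [])) := rfl

-- the grouping fold of A, expressed in B's dedup/filter shape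
theorem group_fold_items (pairs : List (String × String)) :
    (pairs.foldl (fun (d : PySem.Dict String (List String)) p => d.modify p.1 [] (fun l => l ++ [p.2]))
      PySem.Dict.empty).items
    = (PySem.List.dedup (pairs.map (fun p => p.1))).map
        (fun s => (s, (pairs.filter (fun p => p.1 == s)).map (fun p => p.2))) := by
  set D := pairs.foldl (fun (d : PySem.Dict String (List String)) p => d.modify p.1 [] (fun l => l ++ [p.2])) PySem.Dict.empty with hD
  have hnodup : D.keys.Nodup := by
    rw [hD]
    exact PySem.Dict.nodup_keys_foldl_modify_key _ _ _ _ _ (by simp)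
  have hkeys : D.keys = PySem.List.dedup (pairs.map (fun p => p.1)) := by
    rw [hD, PySem.Dict.keys_foldl_modify_key]
    simp [PySem.Dict.keys_empty, PySem.List.dedup_eq_ofList, PySem.Set.ofList_eq_foldl, PySem.Set.update]
  have hget : ∀ c, D.getD c [] = (pairs.filter (fun p => p.1 == c)).map (fun p => p.2) := by
    intro c
    rw [hD, PySem.Dict.getD_foldl_modify_append]
    simp
  rw [items_eq_keys_map D hnodup, hkeys]
  apply List.map_congr_left
  intro s _
  rw [hget s]

-- the (supercategory, id) pair extracted from one item
def pairOf (kv : String × List (String × String)) : String × String :=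
  (((PySem.Dict.ofList kv.2).get? "supercategory").getD "", ((PySem.Dict.ofList kv.2).get? "id").getD "")

theorem ports_agree (cats : List (String × List (String × String))) :
    get_supercats_ids cats = get_supercats_ids_alt cats := by
  unfold get_supercats_ids get_supercats_ids_alt
  have hfun : (fun (d : PySem.Dict String (List String)) (kv : String × List (String × String)) =>
      let item := PySem.Dict.ofList kv.2
      let item_id := (item.get? "id").getD ""
      let item_super := (item.get? "supercategory").getD ""
      if d.contains item_super = false then
        (d.insert item_super []).modify item_super [] (fun l => l ++ [item_id])
      else
        d.modify item_super [] (fun l => l ++ [item_id]))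
    = (fun d kv => d.modify (pairOf kv).1 [] (fun l => l ++ [(pairOf kv).2])) := by
    funext d kv
    exact step_collapse d _ _
  have hswap : (((PySem.Dict.ofList cats).items.map pairOf).foldl
        (fun (d : PySem.Dict String (List String)) p => d.modify p.1 [] (fun l => l ++ [p.2]))
        PySem.Dict.empty)
      = (PySem.Dict.ofList cats).items.foldl
        (fun d kv => d.modify (pairOf kv).1 [] (fun l => l ++ [(pairOf kv).2]))
        PySem.Dict.empty := by
    rw [List.foldl_map]
  rw [hfun, ← hswap, group_fold_items]
  simp only [PySem.Dict.values, List.map_map]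
  rfl

-- ===== VERDICT (by name: the statement is the Claim_ definition above) =====
theorem get_supercats_ids_spec : Claim_equal_get_supercats_ids := by
  intro cats _ _
  exact ports_agree cats
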